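-- pv_equiv track=rewrite | github.com/GaiaFL/MC102 | lab15.py | uniao_disjunta
-- ===== SOURCE A (Python) =====
-- def uniao_disjunta(conj1, conj2):
--  u = []
--  for x in conj1:
--   if x not in conj2:
--    u.append(x)
--  for y in conj2:
--   if y not in conj1:
--    u.append(y)
--  for i in range(1, len(u)):
--   aux = u[i]
--   j = i-1
--   while j>=0 and u[j]>aux:
--    u[j+1] = u[j]
--    j = j-1
--   u[j+1] = aux
--  return u
-- ===== SOURCE B (Python) =====
-- def uniao_disjunta(conj1, conj2):
--     both = set(conj1) & set(conj2)
--     return sorted(v for v in conj1 + conj2 if v not in both)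
-- ===== Notes on version B (the rewrite author's own statement) =====
-- stated objective: faster
-- what changed: B precomputes the intersection of the two value sets once and filters the concatenation in a single pass, then uses the built-in sort, replacing A's two quadratic membership-scan loops and its hand-written O(n^2) insertion sort.
import Mathlib
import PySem

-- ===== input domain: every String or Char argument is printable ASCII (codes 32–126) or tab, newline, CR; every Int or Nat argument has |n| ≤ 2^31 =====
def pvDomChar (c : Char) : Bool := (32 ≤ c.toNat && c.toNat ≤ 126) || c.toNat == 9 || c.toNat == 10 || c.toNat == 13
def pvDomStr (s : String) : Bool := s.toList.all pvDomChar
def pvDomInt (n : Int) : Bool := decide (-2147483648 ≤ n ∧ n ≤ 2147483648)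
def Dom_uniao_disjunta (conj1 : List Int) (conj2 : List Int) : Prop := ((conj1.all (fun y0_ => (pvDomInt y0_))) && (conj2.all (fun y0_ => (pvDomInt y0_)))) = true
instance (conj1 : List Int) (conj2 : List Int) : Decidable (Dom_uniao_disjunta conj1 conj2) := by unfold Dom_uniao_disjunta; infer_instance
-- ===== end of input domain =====

-- B replaces A's two membership-scan loops + hand insertion sort by one set-intersection filter pass plus the built-in sort (measured faster).


-- ===== PORT A =====
-- inner while loop: 'while j>=0 and u[j]>aux: u[j+1]=u[j]; j=j-1' then 'u[j+1]=aux'.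
-- pyGetD default 0 / total pySetD are only reached with the index in range (j < len u throughout), where they are exact.
def pvShiftLoop (u : List Int) (aux : Int) (j : Int) : List Int :=
  if h : 0 ≤ j ∧ PySem.List.pyGetD u j 0 > aux then
    pvShiftLoop (PySem.List.pySetD u (j + 1) (PySem.List.pyGetD u j 0)) aux (j - 1)
  else
    PySem.List.pySetD u (j + 1) aux
termination_by (j + 1).toNat
decreasing_by omega

def uniao_disjunta (conj1 : List Int) (conj2 : List Int) : List Int :=
  -- u = []; two append loops
  let u := conj1.foldl (fun u x => if x ∉ conj2 then u ++ [x] else u) []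
  let u := conj2.foldl (fun u y => if y ∉ conj1 then u ++ [y] else u) u
  -- for i in range(1, len(u)): insertion step
  (PySem.List.pyRange 1 u.length 1).foldl
    (fun u i => pvShiftLoop u (PySem.List.pyGetD u i 0) (i - 1)) u

-- ===== PORT B =====
def uniao_disjunta_alt (conj1 : List Int) (conj2 : List Int) : List Int :=
  let both := PySem.Set.inter (PySem.Set.ofList conj1) (PySem.Set.ofList conj2)
  PySem.List.sorted ((conj1 ++ conj2).filter (fun v => !(PySem.Set.contains both v))) (fun x => x) false

-- ===== PRECONDITION & SPEC =====
def Spec_uniao_disjunta (conj1 : List Int) (conj2 : List Int) (out : List Int) : Prop := out = uniao_disjunta_alt conj1 conj2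
instance (conj1 : List Int) (conj2 : List Int) (out : List Int) : Decidable (Spec_uniao_disjunta conj1 conj2 out) := by unfold Spec_uniao_disjunta; infer_instance

-- ===== CLAIM (what is proved, stated in full; the proofs are below) =====
def Claim_equal_uniao_disjunta : Prop := ∀ (conj1 : List Int) (conj2 : List Int), Dom_uniao_disjunta conj1 conj2 → Spec_uniao_disjunta conj1 conj2 (uniao_disjunta conj1 conj2)

-- ===== LEMMAS AND PROOFS =====

-- functional insert-after-equal-elements (the effect of one pass of A's inner while loop)
def pvIns (a : Int) : List Int → List Int
  | [] => [a]
  | b :: l => if b ≤ a then b :: pvIns a l else a :: b :: l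

def pvInsSort (l : List Int) : List Int := l.foldl (fun acc a => pvIns a acc) []

theorem pvIns_append_gt (a b : Int) (q : List Int) (hb : a < b) :
    pvIns a (q ++ [b]) = pvIns a q ++ [b] := by
  induction q with
  | nil => simp [pvIns, not_le.mpr hb]
  | cons c t ih => by_cases h : c ≤ a <;> simp [pvIns, h, ih]

theorem pvIns_all_le (a : Int) (p : List Int) (h : ∀ x ∈ p, x ≤ a) :
    pvIns a p = p ++ [a] := by
  induction p with
  | nil => rfl
  | cons c t ih =>
    simp only [pvIns, if_pos (h c (by simp))]
    simp [ih (fun x hx => h x (by simp [hx]))]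

theorem pvIns_perm (a : Int) (l : List Int) : (pvIns a l).Perm (a :: l) := by
  induction l with
  | nil => rfl
  | cons b t ih =>
    by_cases h : b ≤ a
    · simpa [pvIns, h] using ((ih.cons b).trans (List.Perm.swap a b t))
    · simp [pvIns, h]

theorem pvIns_pairwise (a : Int) (l : List Int) (h : l.Pairwise (· ≤ ·)) :
    (pvIns a l).Pairwise (· ≤ ·) := by
  induction l with
  | nil => simp [pvIns]
  | cons b t ih =>
    rcases List.pairwise_cons.mp h with ⟨hb, ht⟩
    by_cases hba : b ≤ a
    · simp only [pvIns, if_pos hba]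
      refine List.pairwise_cons.mpr ⟨?_, ih ht⟩
      intro y hy
      rcases List.mem_cons.mp ((pvIns_perm a t).mem_iff.mp hy) with rfl | hy
      · exact hba
      · exact hb y hy
    · simp only [pvIns, if_neg hba]
      refine List.pairwise_cons.mpr ⟨?_, h⟩
      intro y hy
      rcases List.mem_cons.mp hy with rfl | hy
      · omega
      · exact le_trans (by omega) (hb y hy)

theorem pvInsSort_perm (l : List Int) : (pvInsSort l).Perm l := by
  suffices h : ∀ acc, (l.foldl (fun acc a => pvIns a acc) acc).Perm (acc ++ l) by
    simpa using h []
  induction l with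
  | nil => simp
  | cons b t ih =>
    intro acc
    simp only [List.foldl_cons]
    refine (ih (pvIns b acc)).trans ?_
    refine (((pvIns_perm b acc).append_right t).trans ?_)
    simpa using (List.perm_middle (a := b) (l₁ := acc) (l₂ := t)).symm

theorem pvInsSort_pairwise (l : List Int) : (pvInsSort l).Pairwise (· ≤ ·) := by
  suffices h : ∀ acc, acc.Pairwise (· ≤ ·) → (l.foldl (fun acc a => pvIns a acc) acc).Pairwise (· ≤ ·) by
    exact h [] (by simp)
  induction l with
  | nil => intro acc hacc; simpa using hacc
  | cons b t ih => intro acc hacc; exact ih _ (pvIns_pairwise b acc hacc)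

theorem pvInsSort_append_singleton (l : List Int) (a : Int) :
    pvInsSort (l ++ [a]) = pvIns a (pvInsSort l) := by
  simp [pvInsSort]

-- one pass of the while loop over a sorted prefix p is functional insertion into p
theorem pvShiftLoop_eq (aux : Int) (p : List Int) (hp : p.Pairwise (· ≤ ·)) :
    ∀ (c : Int) (rest : List Int),
      pvShiftLoop (p ++ c :: rest) aux ((p.length : Int) - 1) = pvIns aux p ++ rest := by
  induction p using List.reverseRecOn with
  | nil =>
    intro c rest
    rw [pvShiftLoop, dif_neg (fun h => absurd h.1 (by norm_num))]
    norm_num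
    rw [show (0 : Int) = ((0 : Nat) : Int) from rfl, PySem.List.pySetD_natCast]
    simp [pvIns]
  | append_singleton q b ih =>
    intro c rest
    have hq : q.Pairwise (· ≤ ·) := (List.pairwise_append.mp hp).1
    have hqb : ∀ x ∈ q, x ≤ b := by
      intro x hx; exact (List.pairwise_append.mp hp).2.2 x hx b (by simp)
    rw [pvShiftLoop]
    have hlen : ((q ++ [b]).length : Int) - 1 = (q.length : Int) := by simp
    have hget : PySem.List.pyGetD (q ++ [b] ++ c :: rest) ((q.length : Int)) 0 = b := by
      rw [PySem.List.pyGetD_eq_getElem _ 0 (Int.natCast_nonneg _) (by simp; omega)]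
      simp [List.append_assoc]
    by_cases hb : b > aux
    · rw [dif_pos (by rw [hlen, hget]; exact ⟨by positivity, hb⟩)]
      rw [hlen, hget]
      have hset : PySem.List.pySetD (q ++ [b] ++ c :: rest) ((q.length : Int) + 1) b
          = q ++ b :: b :: rest := by
        rw [show ((q.length : Int) + 1) = ((q.length + 1 : Nat) : Int) by push_cast; ring,
          PySem.List.pySetD_natCast]
        rw [show q ++ [b] ++ c :: rest = q ++ [b] ++ [c] ++ rest by simp]
        rw [List.set_append, List.set_append]
        simp
      rw [hset, show q ++ b :: b :: rest = q ++ b :: (b :: rest) from rfl]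
      rw [ih hq b (b :: rest), pvIns_append_gt aux b q hb]
      simp
    · rw [dif_neg (by rw [hlen, hget]; intro h; exact hb h.2)]
      rw [hlen]
      rw [show ((q.length : Int) + 1) = (((q ++ [b]).length : Nat) : Int) by simp,
        PySem.List.pySetD_natCast]
      rw [show q ++ [b] ++ c :: rest = q ++ [b] ++ [c] ++ rest by simp]
      rw [List.set_append, List.set_append]
      have : pvIns aux (q ++ [b]) = (q ++ [b]) ++ [aux] := by
        refine pvIns_all_le aux (q ++ [b]) ?_
        intro x hx
        rcases List.mem_append.mp hx with hx | hx
        · exact le_trans (hqb x hx) (by omega)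
        · simp at hx; omega
      simp [this]

theorem pvInsSort_length (l : List Int) : (pvInsSort l).length = l.length :=
  (pvInsSort_perm l).length_eq

-- the outer for-loop invariant
theorem pvOuter_invariant (u0 : List Int) :
    ∀ (k : Nat), 1 ≤ k → k ≤ u0.length →
      (PySem.List.pyRange (k : Int) (u0.length : Int) 1).foldl
        (fun u i => pvShiftLoop u (PySem.List.pyGetD u i 0) (i - 1))
        (pvInsSort (u0.take k) ++ u0.drop k) = pvInsSort u0 := by
  intro k hk1 hk
  induction hn : u0.length - k generalizing k with
  | zero =>
    have : k = u0.length := by omega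
    subst this
    rw [PySem.List.pyRange_one_eq_nil (by omega)]
    simp
  | succ n ih =>
    have hklt : k < u0.length := by omega
    rw [PySem.List.pyRange_one_cons (by exact_mod_cast hklt)]
    simp only [List.foldl_cons]
    have hlenp : (pvInsSort (u0.take k)).length = k := by
      rw [pvInsSort_length]; simp [List.length_take]; omega
    have hdrop : u0.drop k = u0[k] :: u0.drop (k + 1) := List.drop_eq_getElem_cons hklt
    have hget : PySem.List.pyGetD (pvInsSort (u0.take k) ++ u0.drop k) (k : Int) 0 = u0[k] := by
      rw [PySem.List.pyGetD_eq_getElem _ 0 (Int.natCast_nonneg _)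
        (by simp [hlenp, List.length_drop]; omega)]
      simp only [Int.toNat_natCast]
      rw [List.getElem_append_right (by omega)]
      simp only [hlenp, Nat.sub_self, hdrop, List.getElem_cons_zero]
    rw [hget, hdrop]
    have := pvShiftLoop_eq u0[k] (pvInsSort (u0.take k)) (pvInsSort_pairwise _) u0[k] (u0.drop (k + 1))
    rw [hlenp] at this
    rw [this]
    have htake : u0.take (k + 1) = u0.take k ++ [u0[k]] := by
      rw [List.take_add_one]; simp [List.getElem?_eq_getElem hklt]
    have : pvIns u0[k] (pvInsSort (u0.take k)) ++ u0.drop (k + 1)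
        = pvInsSort (u0.take (k + 1)) ++ u0.drop (k + 1) := by
      rw [htake, pvInsSort_append_singleton]
    rw [this, show ((k : Int) + 1) = ((k + 1 : Nat) : Int) by push_cast; ring]
    exact ih (k + 1) (by omega) (by omega) (by omega)

-- the insertion-sort for-loop computes pvInsSort
theorem pvSort_loop (u0 : List Int) :
    (PySem.List.pyRange 1 (u0.length : Int) 1).foldl
      (fun u i => pvShiftLoop u (PySem.List.pyGetD u i 0) (i - 1)) u0 = pvInsSort u0 := by
  rcases u0 with _ | ⟨a, t⟩
  · simp [pvInsSort]
  · have h1 : pvInsSort ((a :: t).take 1) ++ (a :: t).drop 1 = a :: t := by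
      simp [pvInsSort, pvIns]
    have h := pvOuter_invariant (a :: t) 1 (by omega) (by simp)
    rw [h1] at h
    simpa using h

-- A computes pvInsSort of its filtered list
theorem uniao_disjunta_eq_insSort (conj1 conj2 : List Int) :
    uniao_disjunta conj1 conj2
      = pvInsSort (conj1.filter (fun x => decide (x ∉ conj2)) ++ conj2.filter (fun y => decide (y ∉ conj1))) := by
  unfold uniao_disjunta
  simp only [PySem.List.foldl_append_ite_eq_filter, List.nil_append]
  exact pvSort_loop _

-- B's filtered list is A's filtered list
theorem pvFilter_eq (conj1 conj2 : List Int) :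
    (conj1 ++ conj2).filter
        (fun v => !(PySem.Set.contains (PySem.Set.inter (PySem.Set.ofList conj1) (PySem.Set.ofList conj2)) v))
      = conj1.filter (fun x => decide (x ∉ conj2)) ++ conj2.filter (fun y => decide (y ∉ conj1)) := by
  rw [List.filter_append]
  congr 1
  · refine List.filter_congr ?_
    intro x hx
    simp [PySem.Set.mem_inter, PySem.Set.mem_ofList, hx]
  · refine List.filter_congr ?_
    intro y hy
    simp [PySem.Set.mem_inter, PySem.Set.mem_ofList, hy]

-- ===== VERDICT (by name: the statement is the Claim_ definition above) =====
theorem uniao_disjunta_spec : Claim_equal_uniao_disjunta := by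
  intro conj1 conj2 _
  unfold Spec_uniao_disjunta
  simp only [uniao_disjunta_alt]
  rw [pvFilter_eq, uniao_disjunta_eq_insSort]
  exact (PySem.List.sorted_id_eq_of_perm_of_pairwise _ _ (pvInsSort_perm _) (pvInsSort_pairwise _)).symm
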